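-- pv_equiv track=rewrite | github.com/BreslavetsAlexander/vsu_programming | 02_homework/4.py | calculate_brackets
-- ===== SOURCE A (Python) =====
-- def calculate_brackets(s):
--     brackets = []
--     opened_brackets = 0
--     closed_brackets = 0
--     msg = 'Ok'
--     for i in s:
--         if i == '(' or i == ')':
--             brackets.append(i)
--     for b in brackets:
--         if b == '(':
--             opened_brackets += 1
--     closed_brackets = len(brackets) - opened_brackets
--     if opened_brackets > closed_brackets:
--         msg = 'missing ' + str(opened_brackets - closed_brackets) + ' )'
--     elif closed_brackets > opened_brackets:
--         msg = 'missing ' + str(closed_brackets - opened_brackets) + ' ('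
--     return msg
-- ===== SOURCE B (Python) =====
-- def calculate_brackets(s):
--     pending = []          # stack of currently unmatched '(' characters
--     extra_close = 0       # ')' seen with no '(' to match
--     for c in s:
--         if c == '(':
--             pending.append(c)
--         elif c == ')':
--             if pending:
--                 pending.pop()
--             else:
--                 extra_close += 1
--     if len(pending) > extra_close:
--         return 'missing ' + str(len(pending) - extra_close) + ' )'
--     if extra_close > len(pending):
--         return 'missing ' + str(extra_close - len(pending)) + ' ('
--     return 'Ok'
-- ===== Notes on version B (the rewrite author's own statement) =====
-- stated objective: alternative
-- what changed: Replaces A's filter-into-a-list plus second counting pass with a stack-based matcher: opens are pushed, each close pops a matching open or bumps an unmatched-close counter, and the message is built from the leftover unmatched opens vs unmatched closes (correct because each pop cancels exactly one open with one close, so unmatched_opens - unmatched_closes equals A's opened - closed).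
import Mathlib
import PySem

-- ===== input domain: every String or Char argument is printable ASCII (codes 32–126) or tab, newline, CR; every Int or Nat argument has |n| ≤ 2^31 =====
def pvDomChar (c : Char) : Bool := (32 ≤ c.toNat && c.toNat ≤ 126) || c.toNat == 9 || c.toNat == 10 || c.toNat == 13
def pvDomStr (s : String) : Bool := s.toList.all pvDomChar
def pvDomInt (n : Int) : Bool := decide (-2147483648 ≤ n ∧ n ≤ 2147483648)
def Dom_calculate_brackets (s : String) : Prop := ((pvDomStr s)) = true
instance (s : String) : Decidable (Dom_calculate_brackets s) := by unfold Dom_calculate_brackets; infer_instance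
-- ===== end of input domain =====

-- B replaces A's filter-then-count passes with a one-pass stack matcher (unmatched opens on a stack,
-- unmatched closes counted); objective: alternative algorithm.
-- ===== PORT A =====
def calculate_brackets (s : String) : String :=
  let brackets := s.toList.foldl (fun acc i => if i = '(' ∨ i = ')' then acc ++ [i] else acc) []
  let opened_brackets := brackets.foldl (fun acc b => if b = '(' then acc + 1 else acc) (0 : Int)
  let closed_brackets : Int := (brackets.length : Int) - opened_brackets
  if opened_brackets > closed_brackets then
    "missing " ++ PySem.Int.toStr (opened_brackets - closed_brackets) ++ " )"
  else if closed_brackets > opened_brackets then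
    "missing " ++ PySem.Int.toStr (closed_brackets - opened_brackets) ++ " ("
  else "Ok"

-- ===== PORT B =====
-- pending.append / pending.pop() at the list's end → acc ++ [c] / dropLast
def calculate_brackets_alt (s : String) : String :=
  let st := s.toList.foldl
    (fun (st : List Char × Int) c =>
      if c = '(' then (st.1 ++ [c], st.2)
      else if c = ')' then
        if st.1 ≠ [] then (st.1.dropLast, st.2) else (st.1, st.2 + 1)
      else st) (([] : List Char), (0 : Int))
  if (st.1.length : Int) > st.2 then
    "missing " ++ PySem.Int.toStr ((st.1.length : Int) - st.2) ++ " )"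
  else if st.2 > (st.1.length : Int) then
    "missing " ++ PySem.Int.toStr (st.2 - (st.1.length : Int)) ++ " ("
  else "Ok"

-- ===== PRECONDITION & SPEC =====
def Spec_calculate_brackets (s : String) (out : String) : Prop := out = calculate_brackets_alt s
instance (s : String) (out : String) : Decidable (Spec_calculate_brackets s out) := by unfold Spec_calculate_brackets; infer_instance

-- ===== CLAIM (what is proved, stated in full; the proofs are below) =====
def Claim_equal_calculate_brackets : Prop := ∀ (s : String), Dom_calculate_brackets s → Spec_calculate_brackets s (calculate_brackets s)

-- ===== LEMMAS AND PROOFS =====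

-- A's state: 2*opened - |brackets| equals the plain running balance of the char list.
theorem pv_key (l : List Char) (acc : List Char) :
    2 * ((l.foldl (fun acc i => if i = '(' ∨ i = ')' then acc ++ [i] else acc) acc).foldl
          (fun acc b => if b = '(' then acc + 1 else acc) (0 : Int))
      - ((l.foldl (fun acc i => if i = '(' ∨ i = ')' then acc ++ [i] else acc) acc).length : Int)
    = l.foldl (fun bal c => if c = '(' then bal + 1 else if c = ')' then bal - 1 else bal)
        (2 * (acc.foldl (fun acc b => if b = '(' then acc + 1 else acc) (0 : Int)) - (acc.length : Int)) := by
  induction l generalizing acc with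
  | nil => rfl
  | cons c l ih =>
    simp only [List.foldl]
    by_cases h1 : c = '('
    · subst h1
      rw [show (if ('(' : Char) = '(' ∨ ('(' : Char) = ')' then acc ++ ['('] else acc)
            = acc ++ ['('] from if_pos (Or.inl rfl), ih]
      congr 1
      rw [show ((acc ++ ['(']).foldl (fun acc b => if b = '(' then acc + 1 else acc) (0 : Int))
            = acc.foldl (fun acc b => if b = '(' then acc + 1 else acc) (0 : Int) + 1 by
          rw [List.foldl_append]; rfl]
      simp only [List.length_append, List.length_cons, List.length_nil]
      push_cast
      ring
    · by_cases h2 : c = ')'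
      · subst h2
        rw [if_neg (by decide : ¬ (')' : Char) = '('),
            show (if (')' : Char) = '(' ∨ (')' : Char) = ')' then acc ++ [')'] else acc)
              = acc ++ [')'] from if_pos (Or.inr rfl), ih]
        congr 1
        rw [show ((acc ++ [')']).foldl (fun acc b => if b = '(' then acc + 1 else acc) (0 : Int))
              = acc.foldl (fun acc b => if b = '(' then acc + 1 else acc) (0 : Int) by
            rw [List.foldl_append]; rfl]
        simp only [List.length_append, List.length_cons, List.length_nil]
        push_cast
        ring
      · rw [if_neg h1, if_neg h2, if_neg (by simp [h1, h2]), ih]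

-- B's state: stack length minus the unmatched-close counter equals the same running balance.
theorem pv_stack (l : List Char) (stk : List Char) (ec : Int) :
    (((l.foldl (fun (st : List Char × Int) c =>
        if c = '(' then (st.1 ++ [c], st.2)
        else if c = ')' then
          if st.1 ≠ [] then (st.1.dropLast, st.2) else (st.1, st.2 + 1)
        else st) (stk, ec)).1.length : Int)
      - (l.foldl (fun (st : List Char × Int) c =>
        if c = '(' then (st.1 ++ [c], st.2)
        else if c = ')' then
          if st.1 ≠ [] then (st.1.dropLast, st.2) else (st.1, st.2 + 1)
        else st) (stk, ec)).2)
    = l.foldl (fun bal c => if c = '(' then bal + 1 else if c = ')' then bal - 1 else bal)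
        ((stk.length : Int) - ec) := by
  induction l generalizing stk ec with
  | nil => rfl
  | cons c l ih =>
    simp only [List.foldl]
    by_cases h1 : c = '('
    · subst h1
      rw [if_pos rfl, if_pos rfl, ih]
      congr 1
      simp only [List.length_append, List.length_cons, List.length_nil]
      push_cast; ring
    · by_cases h2 : c = ')'
      · subst h2
        rw [if_neg h1, if_neg h1, if_pos rfl, if_pos rfl]
        by_cases h3 : stk = []
        · subst h3
          rw [if_neg (by simp), ih]
          congr 1
          simp only [List.length_nil]
          ring
        · rw [if_pos h3, ih]
          congr 1
          rw [List.length_dropLast]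
          have : stk.length ≠ 0 := by simpa [List.length_eq_zero_iff] using h3
          omega
      · rw [if_neg h1, if_neg h2, if_neg h1, if_neg h2, ih]

-- ===== VERDICT (by name: the statement is the Claim_ definition above) =====
theorem calculate_brackets_spec : Claim_equal_calculate_brackets := by
  intro s _
  unfold Spec_calculate_brackets calculate_brackets calculate_brackets_alt
  dsimp only
  have hA := pv_key s.toList []
  have hB := pv_stack s.toList [] 0
  simp only [List.foldl_nil, List.length_nil, Nat.cast_zero, mul_zero, sub_zero] at hA hB
  set brackets := s.toList.foldl (fun acc i => if i = '(' ∨ i = ')' then acc ++ [i] else acc) ([] : List Char)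
  set opened := brackets.foldl (fun acc b => if b = '(' then acc + 1 else acc) (0 : Int)
  set st := s.toList.foldl (fun (st : List Char × Int) c =>
        if c = '(' then (st.1 ++ [c], st.2)
        else if c = ')' then
          if st.1 ≠ [] then (st.1.dropLast, st.2) else (st.1, st.2 + 1)
        else st) (([] : List Char), (0 : Int))
  set bal := s.toList.foldl (fun bal c => if c = '(' then bal + 1 else if c = ')' then bal - 1 else bal) (0 : Int)
  rcases lt_trichotomy bal 0 with h0 | h0 | h0
  · rw [if_neg (by omega), if_pos (by omega), if_neg (by omega), if_pos (by omega)]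
    have : (brackets.length : Int) - opened - opened = st.2 - (st.1.length : Int) := by omega
    rw [this]
  · rw [if_neg (by omega), if_neg (by omega), if_neg (by omega), if_neg (by omega)]
  · rw [if_pos (by omega), if_pos (by omega)]
    have : opened - ((brackets.length : Int) - opened) = (st.1.length : Int) - st.2 := by omega
    rw [this]
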